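-- pv_equiv track=rewrite | github.com/Ddasch/Feature_Discovery | featurediscovery/util/general_utilities.py | create_duovariate_combination_dicts
-- ===== SOURCE A (Python) =====
-- from typing import List
--
-- def create_duovariate_combination_dicts(mandatory_features:List[str]
--                                         , feature_space:List[str]
--                                         , kernels:List[str]
--                                         , standardizer:List[str]):
--
--     all_dicts = []
--
--     for feat_index_a in range(len(feature_space)):
--         for feat_index_b in range(feat_index_a + 1 ,len(feature_space)):
--             for kernel_str in kernels:
--                 for standardizer_str in standardizer:
--
--                     if mandatory_features is not None:
--                         if feature_space[feat_index_a] not in mandatory_features and feature_space[feat_index_b] not in mandatory_features: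
--                             continue
--
--                     all_dicts.append({
--                         'feature_a': feature_space[feat_index_a],
--                         'feature_b': feature_space[feat_index_b],
--                         'kernel': kernel_str,
--                         'standardizer': standardizer_str
--                     })
--
--
--     return all_dicts
-- ===== SOURCE B (Python) =====
-- def create_duovariate_combination_dicts(mandatory_features,
--                                         feature_space,
--                                         kernels,
--                                         standardizer):
--     # Precompute the kernel x standardizer grid once, flattening A's two inner loops.
--     grid = [(k, s) for k in kernels for s in standardizer]
--     mset = None if mandatory_features is None else set(mandatory_features)
--     out = []
--     rest = feature_space
--     # Consume the feature list head by head (while-loop over suffixes instead of index loops).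
--     while rest:
--         head, rest = rest[0], rest[1:]
--         if mset is None or head in mset:
--             # a mandatory (or unfiltered) head keeps every later partner: no per-partner test
--             partners = rest
--         else:
--             # a non-mandatory head keeps only mandatory partners
--             partners = [fb for fb in rest if fb in mset]
--         for fb in partners:
--             for k, s in grid:
--                 out.append({'feature_a': head, 'feature_b': fb,
--                             'kernel': k, 'standardizer': s})
--     return out
-- ===== Notes on version B (the rewrite author's own statement) =====
-- stated objective: faster
-- what changed: Replaces A's four-deep index loop (mandatory test re-evaluated per kernel x standardizer cell) by a suffix-consuming loop with a precomputed kernel x standardizer grid and an asymmetric per-head test: a mandatory head keeps all later partners without any per-partner check, a non-mandatory head pre-filters its partners against a set once.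
import Mathlib
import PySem

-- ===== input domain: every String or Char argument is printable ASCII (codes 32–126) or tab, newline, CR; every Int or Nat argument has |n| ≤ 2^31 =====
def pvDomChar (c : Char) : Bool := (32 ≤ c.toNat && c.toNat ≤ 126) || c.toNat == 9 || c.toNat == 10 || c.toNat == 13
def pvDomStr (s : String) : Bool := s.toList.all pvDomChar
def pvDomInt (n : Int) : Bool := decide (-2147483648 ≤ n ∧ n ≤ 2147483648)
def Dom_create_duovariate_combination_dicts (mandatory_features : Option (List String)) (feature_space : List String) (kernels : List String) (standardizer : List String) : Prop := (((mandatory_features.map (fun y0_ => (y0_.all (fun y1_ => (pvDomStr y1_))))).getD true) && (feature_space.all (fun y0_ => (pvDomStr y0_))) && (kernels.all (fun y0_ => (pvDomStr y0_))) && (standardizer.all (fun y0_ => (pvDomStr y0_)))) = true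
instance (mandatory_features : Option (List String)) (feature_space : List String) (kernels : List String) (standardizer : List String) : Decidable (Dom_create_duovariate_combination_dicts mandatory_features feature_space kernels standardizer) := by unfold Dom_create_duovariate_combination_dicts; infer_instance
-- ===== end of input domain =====

-- B replaces A's four-deep index loop by a suffix-consuming loop with a precomputed kernel × standardizer grid and a per-head mandatory test; measured faster in a timing run.


-- ===== PORT A =====
-- Port of A: the original four-deep index loop, mandatory test re-evaluated in the innermost body.
def create_duovariate_combination_dicts (mandatory_features : Option (List String)) (feature_space : List String) (kernels : List String) (standardizer : List String) : List (List (String × String)) :=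
  (PySem.List.pyRange 0 (feature_space.length : Int) 1).foldl (fun all_dicts feat_index_a =>
    (PySem.List.pyRange (feat_index_a + 1) (feature_space.length : Int) 1).foldl (fun all_dicts feat_index_b =>
      kernels.foldl (fun all_dicts kernel_str =>
        standardizer.foldl (fun all_dicts standardizer_str =>
          match mandatory_features with
          | some m =>
            if PySem.List.pyGetD feature_space feat_index_a "" ∉ m ∧
               PySem.List.pyGetD feature_space feat_index_b "" ∉ m then
              all_dicts
            else
              all_dicts ++ [[("feature_a", PySem.List.pyGetD feature_space feat_index_a ""),
                             ("feature_b", PySem.List.pyGetD feature_space feat_index_b ""),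
                             ("kernel", kernel_str), ("standardizer", standardizer_str)]]
          | none =>
              all_dicts ++ [[("feature_a", PySem.List.pyGetD feature_space feat_index_a ""),
                             ("feature_b", PySem.List.pyGetD feature_space feat_index_b ""),
                             ("kernel", kernel_str), ("standardizer", standardizer_str)]]) all_dicts) all_dicts) all_dicts) []

-- ===== PORT B =====
-- B: grid = [(k, s) for k in kernels for s in standardizer]
def pvGridB (kernels standardizer : List String) : List (String × String) :=
  kernels.flatMap (fun k => standardizer.map (fun s => (k, s)))

-- B's while loop consuming the feature list head by head, accumulator 'out'.
def pvLoopB (mset : Option (PySem.Set String)) (grid : List (String × String)) :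
    List String → List (List (String × String)) → List (List (String × String))
  | [], out => out
  | head :: rest, out =>
      let partners : List String :=
        match mset with
        | none => rest
        | some m =>
            if PySem.Set.contains m head then rest
            else rest.filter (fun fb => PySem.Set.contains m fb)
      pvLoopB mset grid rest
        (partners.foldl (fun out fb =>
          grid.foldl (fun out ks =>
            out ++ [[("feature_a", head), ("feature_b", fb),
                     ("kernel", ks.1), ("standardizer", ks.2)]]) out) out)

-- Port of B.
def create_duovariate_combination_dicts_alt (mandatory_features : Option (List String)) (feature_space : List String) (kernels : List String) (standardizer : List String) : List (List (String × String)) :=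
  pvLoopB (mandatory_features.map PySem.Set.ofList) (pvGridB kernels standardizer) feature_space []

-- ===== PRECONDITION & SPEC =====
def Spec_create_duovariate_combination_dicts (mandatory_features : Option (List String)) (feature_space : List String) (kernels : List String) (standardizer : List String) (out : List (List (String × String))) : Prop := out = create_duovariate_combination_dicts_alt mandatory_features feature_space kernels standardizer
instance (mandatory_features : Option (List String)) (feature_space : List String) (kernels : List String) (standardizer : List String) (out : List (List (String × String))) : Decidable (Spec_create_duovariate_combination_dicts mandatory_features feature_space kernels standardizer out) := by unfold Spec_create_duovariate_combination_dicts; infer_instance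

-- ===== CLAIM (what is proved, stated in full; the proofs are below) =====
def Claim_equal_create_duovariate_combination_dicts : Prop := ∀ (mandatory_features : Option (List String)) (feature_space : List String) (kernels : List String) (standardizer : List String), Dom_create_duovariate_combination_dicts mandatory_features feature_space kernels standardizer → Spec_create_duovariate_combination_dicts mandatory_features feature_space kernels standardizer (create_duovariate_combination_dicts mandatory_features feature_space kernels standardizer)

-- ===== LEMMAS AND PROOFS =====

-- per-pair expansion used throughout the proof
def pvExpand (kernels standardizer : List String) (fa fb : String) : List (List (String × String)) :=
  kernels.flatMap (fun k => standardizer.map (fun s =>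
    [("feature_a", fa), ("feature_b", fb), ("kernel", k), ("standardizer", s)]))

lemma pv_foldl_id {α β : Type} (l : List α) (acc : β) : l.foldl (fun a _ => a) acc = acc := by
  induction l generalizing acc with
  | nil => rfl
  | cons x xs ih => exact ih acc

-- A's two innermost loops, mandatory_features = None
lemma pv_inner_none (kernels standardizer : List String) (fa fb : String)
    (acc : List (List (String × String))) :
    kernels.foldl (fun all_dicts kernel_str =>
      standardizer.foldl (fun all_dicts standardizer_str =>
        all_dicts ++ [[("feature_a", fa), ("feature_b", fb), ("kernel", kernel_str), ("standardizer", standardizer_str)]]) all_dicts) acc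
    = acc ++ pvExpand kernels standardizer fa fb := by
  calc kernels.foldl _ acc
      = kernels.foldl (fun a k => a ++ standardizer.map (fun s => [("feature_a", fa), ("feature_b", fb), ("kernel", k), ("standardizer", s)])) acc := by
        apply PySem.List.foldl_congr_mem; intro a k _
        exact PySem.List.foldl_append_singleton_eq_map _ _ _
    _ = acc ++ pvExpand kernels standardizer fa fb := PySem.List.foldl_append_eq_flatMap _ _ _

-- A's two innermost loops, mandatory_features = Some m
lemma pv_inner_some (m : List String) (kernels standardizer : List String) (fa fb : String)
    (acc : List (List (String × String))) :
    kernels.foldl (fun all_dicts kernel_str =>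
      standardizer.foldl (fun all_dicts standardizer_str =>
        if fa ∉ m ∧ fb ∉ m then all_dicts
        else all_dicts ++ [[("feature_a", fa), ("feature_b", fb), ("kernel", kernel_str), ("standardizer", standardizer_str)]]) all_dicts) acc
    = acc ++ (if decide (fa ∈ m) || decide (fb ∈ m) then pvExpand kernels standardizer fa fb else []) := by
  by_cases hin : fa ∈ m ∨ fb ∈ m
  · have hnot : ¬ (fa ∉ m ∧ fb ∉ m) := by tauto
    have hb : (decide (fa ∈ m) || decide (fb ∈ m)) = true := by
      simp only [Bool.or_eq_true, decide_eq_true_eq]; exact hin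
    rw [hb, if_pos rfl]
    calc kernels.foldl _ acc
        = kernels.foldl (fun a k => a ++ standardizer.map (fun s => [("feature_a", fa), ("feature_b", fb), ("kernel", k), ("standardizer", s)])) acc := by
          apply PySem.List.foldl_congr_mem; intro a k _
          calc standardizer.foldl _ a
              = standardizer.foldl (fun a s => a ++ [[("feature_a", fa), ("feature_b", fb), ("kernel", k), ("standardizer", s)]]) a := by
                apply PySem.List.foldl_congr_mem; intro a s _
                exact if_neg hnot
            _ = a ++ standardizer.map (fun s => [("feature_a", fa), ("feature_b", fb), ("kernel", k), ("standardizer", s)]) :=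
                PySem.List.foldl_append_singleton_eq_map _ _ _
      _ = acc ++ pvExpand kernels standardizer fa fb := PySem.List.foldl_append_eq_flatMap _ _ _
  · have hcond : fa ∉ m ∧ fb ∉ m := by tauto
    have hb : (decide (fa ∈ m) || decide (fb ∈ m)) = false := by
      simp only [Bool.or_eq_false_iff, decide_eq_false_iff_not]; tauto
    rw [hb]
    simp only [Bool.false_eq_true, if_false, List.append_nil]
    calc kernels.foldl _ acc
        = kernels.foldl (fun (a : List (List (String × String))) (_ : String) => a) acc := by
          apply PySem.List.foldl_congr_mem; intro a k _
          calc standardizer.foldl _ a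
              = standardizer.foldl (fun (a : List (List (String × String))) (_ : String) => a) a := by
                apply PySem.List.foldl_congr_mem; intro a s _
                exact if_pos hcond
            _ = a := pv_foldl_id _ _
      _ = acc := pv_foldl_id _ _

-- flatMap over the pairs of a list, structurally
def pvPairsFlat (Q : String → String → List (List (String × String))) : List String → List (List (String × String))
  | [] => []
  | fa :: rest => rest.flatMap (Q fa) ++ pvPairsFlat Q rest

-- flatMap over List.range with drop/getD indexing = structural recursion over the list
lemma pv_range_pairs (feature_space : List String)
    (Q : String → String → List (List (String × String))) :
    (List.range feature_space.length).flatMap (fun i =>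
        (feature_space.drop (i + 1)).flatMap (fun fb => Q (feature_space.getD i "") fb))
    = pvPairsFlat Q feature_space := by
  induction feature_space with
  | nil => rfl
  | cons fa rest ih =>
      simp only [List.length_cons, List.range_succ_eq_map, List.flatMap_cons, List.flatMap_map,
        List.drop_succ_cons, List.getD_cons_succ, List.getD_cons_zero, List.drop_zero, Nat.succ_eq_add_one]
      rw [ih]
      rfl

-- A's two index loops, with an arbitrary per-pair contribution W, equal the structural pair flatMap
lemma pv_double_loop (feature_space : List String)
    (W : String → String → List (List (String × String))) :
    (PySem.List.pyRange 0 (feature_space.length : Int) 1).foldl (fun acc ia =>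
      (PySem.List.pyRange (ia + 1) (feature_space.length : Int) 1).foldl (fun acc ib =>
        acc ++ W (PySem.List.pyGetD feature_space ia "") (PySem.List.pyGetD feature_space ib "")) acc) []
    = pvPairsFlat W feature_space := by
  have houter : ∀ (acc : List (List (String × String))), ∀ ia ∈ PySem.List.pyRange 0 (feature_space.length : Int) 1,
      (PySem.List.pyRange (ia + 1) (feature_space.length : Int) 1).foldl (fun acc ib =>
        acc ++ W (PySem.List.pyGetD feature_space ia "") (PySem.List.pyGetD feature_space ib "")) acc
      = acc ++ (feature_space.drop (ia + 1).toNat).flatMap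
          (fun fb => W (PySem.List.pyGetD feature_space ia "") fb) := by
    intro acc ia hia
    have h0 : (0 : Int) ≤ ia + 1 := by
      have := (PySem.List.mem_pyRange_one.mp hia).1; omega
    rw [PySem.List.foldl_pyRange_pyGetD' feature_space ""
        (fun a fb => a ++ W (PySem.List.pyGetD feature_space ia "") fb) acc h0,
      PySem.List.foldl_append_eq_flatMap]
  rw [PySem.List.foldl_congr_mem _ _ _ _ houter]
  rw [PySem.List.pyRange_zero_natCast feature_space.length, List.foldl_map,
    PySem.List.foldl_append_eq_flatMap]
  rw [← pv_range_pairs]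
  simp only [List.nil_append, PySem.List.pyGetD_natCast,
    show ∀ i : Nat, ((i : Int) + 1).toNat = i + 1 from fun i => by omega]

-- filter-then-flatMap = flatMap of an if
lemma pv_filter_flatMap {α β : Type} (l : List α) (p : α → Bool) (f : α → List β) :
    (l.filter p).flatMap f = l.flatMap (fun x => if p x then f x else []) := by
  induction l with
  | nil => rfl
  | cons x xs ih =>
      by_cases h : p x = true <;> simp [h, ih]

-- B's inner double loop over partners × grid equals appending the flatMap expansion
lemma pv_b_inner (grid : List (String × String)) (partners : List String) (head : String)
    (out : List (List (String × String))) :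
    partners.foldl (fun out fb =>
      grid.foldl (fun out ks =>
        out ++ [[("feature_a", head), ("feature_b", fb),
                 ("kernel", ks.1), ("standardizer", ks.2)]]) out) out
    = out ++ partners.flatMap (fun fb => grid.map (fun ks =>
        [("feature_a", head), ("feature_b", fb), ("kernel", ks.1), ("standardizer", ks.2)])) := by
  calc partners.foldl _ out
      = partners.foldl (fun o fb => o ++ grid.map (fun ks =>
          [("feature_a", head), ("feature_b", fb), ("kernel", ks.1), ("standardizer", ks.2)])) out := by
        apply PySem.List.foldl_congr_mem; intro o fb _
        exact PySem.List.foldl_append_singleton_eq_map _ _ _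
    _ = _ := PySem.List.foldl_append_eq_flatMap _ _ _

-- expansion over the precomputed grid = pvExpand
lemma pv_grid_expand (kernels standardizer : List String) (fa fb : String) :
    (pvGridB kernels standardizer).map (fun ks =>
      [("feature_a", fa), ("feature_b", fb), ("kernel", ks.1), ("standardizer", ks.2)])
    = pvExpand kernels standardizer fa fb := by
  simp only [pvGridB, pvExpand, List.map_flatMap, List.map_map]
  apply List.flatMap_congr; intro k _
  simp

-- membership in the ported set equals list membership
lemma pv_set_mem (m : List String) (x : String) :
    PySem.Set.contains (PySem.Set.ofList m) x = decide (x ∈ m) := by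
  by_cases h : x ∈ m
  · simp [h]
  · simp [h]

-- B's loop equals the structural pair flatMap (generalized over the accumulator)
lemma pv_loopB_eq (mandatory_features : Option (List String)) (kernels standardizer : List String)
    (feature_space : List String) (out : List (List (String × String))) :
    pvLoopB (mandatory_features.map PySem.Set.ofList) (pvGridB kernels standardizer) feature_space out
    = out ++ pvPairsFlat (fun fa fb =>
        if (match mandatory_features with
            | none => true
            | some m => decide (fa ∈ m) || decide (fb ∈ m)) then
          pvExpand kernels standardizer fa fb else []) feature_space := by
  induction feature_space generalizing out with
  | nil => simp [pvLoopB, pvPairsFlat]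
  | cons head rest ih =>
      rw [pvLoopB.eq_def]
      simp only
      rw [pv_b_inner, ih, List.append_assoc]
      congr 1
      rw [pvPairsFlat]
      congr 1
      cases mandatory_features with
      | none =>
          simp only [Option.map_none]
          rw [List.flatMap_congr (fun fb _ => pv_grid_expand kernels standardizer head fb)]
          simp
      | some m =>
          simp only [Option.map_some]
          rw [pv_set_mem]
          by_cases hh : head ∈ m
          · simp only [hh, decide_true, if_true, Bool.true_or]
            apply List.flatMap_congr; intro fb _
            simp [pv_grid_expand]
          · simp only [hh, decide_false, Bool.false_eq_true, if_false, Bool.false_or]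
            rw [List.filter_congr (fun fb _ => pv_set_mem m fb)]
            rw [pv_filter_flatMap]
            apply List.flatMap_congr; intro fb _
            by_cases hb : fb ∈ m <;> simp [hb, pv_grid_expand]

-- ===== VERDICT (by name: the statement is the Claim_ definition above) =====
theorem create_duovariate_combination_dicts_spec : Claim_equal_create_duovariate_combination_dicts := by
  intro mandatory_features feature_space kernels standardizer _
  unfold Spec_create_duovariate_combination_dicts create_duovariate_combination_dicts_alt
  rw [pv_loopB_eq, List.nil_append]
  unfold create_duovariate_combination_dicts
  cases mandatory_features with
  | none =>
      rw [PySem.List.foldl_congr_mem _ _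
        (fun acc ia => (PySem.List.pyRange (ia + 1) (feature_space.length : Int) 1).foldl (fun acc ib =>
          acc ++ pvExpand kernels standardizer (PySem.List.pyGetD feature_space ia "") (PySem.List.pyGetD feature_space ib "")) acc)
        _ (fun acc ia _ => PySem.List.foldl_congr_mem _ _ _ _
            (fun a ib _ => pv_inner_none kernels standardizer _ _ a))]
      rw [pv_double_loop]
      simp only [if_pos]
  | some m =>
      rw [PySem.List.foldl_congr_mem _ _
        (fun acc ia => (PySem.List.pyRange (ia + 1) (feature_space.length : Int) 1).foldl (fun acc ib =>
          acc ++ (if decide (PySem.List.pyGetD feature_space ia "" ∈ m) || decide (PySem.List.pyGetD feature_space ib "" ∈ m) then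
            pvExpand kernels standardizer (PySem.List.pyGetD feature_space ia "") (PySem.List.pyGetD feature_space ib "") else [])) acc)
        _ (fun acc ia _ => PySem.List.foldl_congr_mem _ _ _ _
            (fun a ib _ => pv_inner_some m kernels standardizer _ _ a))]
      rw [pv_double_loop feature_space (fun fa fb =>
        if decide (fa ∈ m) || decide (fb ∈ m) then pvExpand kernels standardizer fa fb else [])]
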